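-- pv_equiv track=rewrite | github.com/kevindong/aoc2021 | day08/day08p1.py | process
-- ===== SOURCE A (Python) =====
-- def process(input):
--     counter = {}
--     for line in input:
--         for display in line:
--             l = len(display)
--             counter[l] = counter.get(l, 0) + 1
--     keys = [2, 4, 3, 7]
--     s = 0
--     for key in keys:
--         s += counter.get(key, 0)
--     return s
-- ===== SOURCE B (Python) =====
-- def process(input):
--     return sum(1 for line in input for display in line if len(display) in {2, 3, 4, 7})
-- ===== Notes on version B (the rewrite author's own statement) =====
-- stated objective: simpler
-- what changed: B drops the intermediate length-histogram dict and the second pass over a key list, counting matching displays directly in a single streaming pass with one integer accumulator.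
import Mathlib
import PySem

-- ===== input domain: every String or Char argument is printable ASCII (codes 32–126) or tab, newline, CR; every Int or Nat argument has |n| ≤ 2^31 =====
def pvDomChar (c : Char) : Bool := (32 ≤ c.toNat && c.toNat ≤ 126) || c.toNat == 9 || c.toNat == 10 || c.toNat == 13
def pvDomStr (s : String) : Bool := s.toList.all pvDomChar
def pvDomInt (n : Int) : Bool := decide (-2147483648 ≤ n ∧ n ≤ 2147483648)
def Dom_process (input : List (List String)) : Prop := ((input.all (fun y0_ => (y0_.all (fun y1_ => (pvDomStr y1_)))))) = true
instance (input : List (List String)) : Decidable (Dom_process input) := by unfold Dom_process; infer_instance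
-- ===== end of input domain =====

-- B replaces A's length-histogram dict plus second key-list pass with one direct single-pass counter (objective: simpler).

-- ===== PORT A =====
def process (input : List (List String)) : Int :=
  let counter : PySem.Dict Int Int :=
    input.foldl (fun c line =>
      line.foldl (fun c display =>
        let l := PySem.Str.len display
        c.insert l (c.getD l 0 + 1)) c) PySem.Dict.empty
  let keys : List Int := [2, 4, 3, 7]
  keys.foldl (fun s key => s + counter.getD key 0) 0

-- ===== PORT B =====
def process_alt (input : List (List String)) : Int :=
  input.foldl (fun acc line =>
    line.foldl (fun acc display =>
      if PySem.Str.len display ∈ ([2, 3, 4, 7] : List Int) then acc + 1 else acc) acc) 0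

-- ===== PRECONDITION & SPEC =====
def Spec_process (input : List (List String)) (out : Int) : Prop := out = process_alt input
instance (input : List (List String)) (out : Int) : Decidable (Spec_process input out) := by unfold Spec_process; infer_instance

-- ===== CLAIM (what is proved, stated in full; the proofs are below) =====
def Claim_equal_process : Prop := ∀ (input : List (List String)), Dom_process input → Spec_process input (process input)

-- ===== LEMMAS AND PROOFS =====

-- the lengths of all displays, flattened
def pvLens (input : List (List String)) : List Int :=
  input.flatMap (fun line => line.map PySem.Str.len)

-- A's dict loop builds exactly the multiset counter of pvLens
lemma process_counter_getD (input : List (List String)) (c : PySem.Dict Int Int) (v : Int) :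
    (input.foldl (fun c line =>
      line.foldl (fun c display =>
        let l := PySem.Str.len display
        c.insert l (c.getD l 0 + 1)) c) c).getD v 0
    = c.getD v 0 + ((pvLens input).count v : Int) := by
  induction input generalizing c with
  | nil => simp [pvLens]
  | cons line rest ih =>
    simp only [List.foldl_cons, ih]
    have : line.foldl (fun c display =>
        let l := PySem.Str.len display
        c.insert l (c.getD l 0 + 1)) c
        = (line.map PySem.Str.len).foldl (fun c x => c.insert x (c.getD x 0 + 1)) c := by
      rw [List.foldl_map]
    rw [this, PySem.Dict.getD_foldl_insert_add_one]
    simp [pvLens, List.count_append]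
    ring

-- B's nested loop counts membership in [2,3,4,7] over pvLens
lemma process_alt_count (input : List (List String)) (acc : Int) :
    input.foldl (fun acc line =>
      line.foldl (fun acc display =>
        if PySem.Str.len display ∈ ([2, 3, 4, 7] : List Int) then acc + 1 else acc) acc) acc
    = acc + (((pvLens input).countP (fun x => x ∈ ([2, 3, 4, 7] : List Int))) : Int) := by
  induction input generalizing acc with
  | nil => simp [pvLens]
  | cons line rest ih =>
    simp only [List.foldl_cons, ih]
    have hline : ∀ (a : Int) (l : List String),
        l.foldl (fun acc display =>
          if PySem.Str.len display ∈ ([2, 3, 4, 7] : List Int) then acc + 1 else acc) a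
        = a + ((l.countP (fun d => PySem.Str.len d ∈ ([2, 3, 4, 7] : List Int))) : Int) := by
      intro a l
      induction l generalizing a with
      | nil => simp
      | cons d t iht =>
        simp only [List.foldl_cons, List.countP_cons, iht]
        by_cases h : PySem.Str.len d ∈ ([2, 3, 4, 7] : List Int) <;>
          simp only [h, if_true, if_false, decide_true, decide_false] <;> push_cast <;> ring
    rw [hline]
    simp [pvLens, List.countP_append, List.countP_map, Function.comp_def]
    ring

-- countP of membership in the distinct key list = the sum of the four counts
lemma countP_mem_keys (L : List Int) :
    (L.countP (fun x => x ∈ ([2, 3, 4, 7] : List Int)) : Int)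
    = (L.count 2 : Int) + (L.count 4 : Int) + (L.count 3 : Int) + (L.count 7 : Int) := by
  induction L with
  | nil => simp
  | cons x t ih =>
    simp only [List.countP_cons, List.count_cons]
    push_cast
    rw [ih]
    by_cases h2 : x = 2
    · subst h2; norm_num; omega
    · by_cases h3 : x = 3
      · subst h3; norm_num; omega
      · by_cases h4 : x = 4
        · subst h4; norm_num; omega
        · by_cases h7 : x = 7
          · subst h7; norm_num; omega
          · have hm : x ∉ ([2, 3, 4, 7] : List Int) := by simp [h2, h3, h4, h7]
            simp [hm, h2, h3, h4, h7]

-- ===== VERDICT (by name: the statement is the Claim_ definition above) =====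
theorem process_spec : Claim_equal_process := by
  intro input _
  unfold Spec_process process process_alt
  simp only []
  rw [process_alt_count]
  have h := fun v => process_counter_getD input PySem.Dict.empty v
  simp only [PySem.Dict.getD_empty] at h
  simp only [List.foldl_cons, List.foldl_nil, h, countP_mem_keys]
  ring
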